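-- pv_equiv track=rewrite | github.com/muhmi/c64-anim-tool | old/python_app/src/animation_converter/color_data_utils.py | generate_color_fill_code
-- ===== SOURCE A (Python) =====
-- def generate_color_fill_code(
--     fill_blocks, min_sequence_length=10, max_sequence_length=120
-- ):
--     def find_sequences(numbers):
--         sequences = []
--         current_seq = []
--
--         for i, num in enumerate(numbers):
--             if not current_seq:
--                 current_seq = [num]
--             elif num == current_seq[-1] + 1:
--                 # Check if adding this number would exceed max length
--                 if len(current_seq) < max_sequence_length:
--                     current_seq.append(num)
--                 else:
--                     # Current sequence has reached max length, store it and start new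
--                     if len(current_seq) >= min_sequence_length:
--                         sequences.append(current_seq)
--                     current_seq = [num]
--             else:
--                 if len(current_seq) >= min_sequence_length:
--                     sequences.append(current_seq)
--                 current_seq = [num]
--
--         if current_seq and len(current_seq) >= min_sequence_length:
--             sequences.append(current_seq)
--
--         return sequences
--
--     def remove_sequences_from_list(numbers, sequences):
--         flat_seq = [num for seq in sequences for num in seq]
--         return [num for num in numbers if num not in flat_seq]
--
--     result = []
--
--     for idx, offsets in enumerate(fill_blocks):
--         result.append(f"fill_color_step{idx}")
--         result.append("\tlda fill_color")
--
--         # Find continuous sequences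
--         sequences = find_sequences(offsets)
--
--         # Generate fill_max_127 calls for sequences
--         for sequence in sequences:
--             start_offset = sequence[0]
--             count = len(sequence)
--             result.append(f"\t#fill_max_127 ${hex(0xd800 + start_offset)[2:]}, {count}")
--
--         # Generate individual sta instructions for remaining offsets
--         remaining = remove_sequences_from_list(offsets, sequences)
--         for offset in remaining:
--             result.append(f"\tsta ${hex(0xd800 + offset)[2:]}")
--
--         result.append("\trts")
--         result.append("")
--
--     return "\n".join(result)
-- ===== SOURCE B (Python) =====
-- from itertools import groupby
--
--
-- def generate_color_fill_code(
--     fill_blocks, min_sequence_length=10, max_sequence_length=120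
-- ):
--     chunk = max(max_sequence_length, 1)
--     lines = []
--     for idx, offsets in enumerate(fill_blocks):
--         lines.append(f"fill_color_step{idx}")
--         lines.append("\tlda fill_color")
--         accepted = set()
--         fills = []
--         # maximal runs of consecutive integers, split into fixed-size pieces
--         for _, grp in groupby(enumerate(offsets), key=lambda ix: ix[1] - ix[0]):
--             run = [v for _, v in grp]
--             for i in range(0, len(run), chunk):
--                 piece = run[i:i + chunk]
--                 if len(piece) >= min_sequence_length:
--                     fills.append(piece)
--                     accepted.update(piece)
--         for piece in fills:
--             lines.append(f"\t#fill_max_127 ${hex(0xd800 + piece[0])[2:]}, {len(piece)}")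
--         for off in offsets:
--             if off not in accepted:
--                 lines.append(f"\tsta ${hex(0xd800 + off)[2:]}")
--         lines.append("\trts")
--         lines.append("")
--     return "\n".join(lines)
-- ===== Notes on version B (the rewrite author's own statement) =====
-- stated objective: idiomatic
-- what changed: Replaces A's hand-rolled stateful accumulator loop (current_seq/sequences with flush-on-break, flush-on-max and final flush) by an itertools.groupby decomposition into maximal consecutive runs, slicing each run into fixed-size chunks filtered by the minimum length, and a set of accepted values instead of A's quadratic 'num not in flat_seq' list scan for the remaining offsets.
import Mathlib
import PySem

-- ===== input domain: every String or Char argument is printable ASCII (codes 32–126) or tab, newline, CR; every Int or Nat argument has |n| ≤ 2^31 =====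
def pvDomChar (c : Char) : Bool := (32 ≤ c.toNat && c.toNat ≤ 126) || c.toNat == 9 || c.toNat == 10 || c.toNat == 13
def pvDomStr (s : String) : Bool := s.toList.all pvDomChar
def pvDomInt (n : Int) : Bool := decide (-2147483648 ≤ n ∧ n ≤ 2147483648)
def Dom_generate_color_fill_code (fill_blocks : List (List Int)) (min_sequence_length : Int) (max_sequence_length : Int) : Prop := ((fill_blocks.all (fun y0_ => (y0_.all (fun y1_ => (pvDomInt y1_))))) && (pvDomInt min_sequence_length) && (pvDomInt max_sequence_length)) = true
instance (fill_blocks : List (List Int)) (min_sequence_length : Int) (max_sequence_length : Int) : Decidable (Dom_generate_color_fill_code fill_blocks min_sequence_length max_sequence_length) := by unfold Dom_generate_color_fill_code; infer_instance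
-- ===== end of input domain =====

-- B replaces A's stateful accumulator loop by a decomposition into maximal consecutive
-- runs, fixed-size chunking of each run, and a set of accepted values (objective: idiomatic).

-- shared formatting helper: hex(n)[2:] (for n < 0, hex(n) = "-0x…" so [2:] = "x…")
def pvHexBody (n : Int) : String :=
  if n < 0 then "x" ++ String.ofList (Nat.toDigits 16 (-n).toNat)
  else String.ofList (Nat.toDigits 16 n.toNat)

-- ===== PORT A =====
-- the body of find_sequences' for-loop, state = (sequences, current_seq)
def pvA_step (minL maxL : Int) (st : List (List Int) × List Int) (num : Int) :
    List (List Int) × List Int :=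
  if st.2 = [] then (st.1, [num])
  else if num = st.2.getLastD 0 + 1 then
    if (st.2.length : Int) < maxL then (st.1, st.2 ++ [num])
    else (if minL ≤ (st.2.length : Int) then st.1 ++ [st.2] else st.1, [num])
  else (if minL ≤ (st.2.length : Int) then st.1 ++ [st.2] else st.1, [num])

def pvA_find (minL maxL : Int) (numbers : List Int) : List (List Int) :=
  let st := numbers.foldl (pvA_step minL maxL) ([], [])
  if st.2 ≠ [] ∧ minL ≤ (st.2.length : Int) then st.1 ++ [st.2] else st.1

def generate_color_fill_code (fill_blocks : List (List Int)) (min_sequence_length : Int) (max_sequence_length : Int) : String :=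
  let result : List String :=
    (PySem.List.enumerate fill_blocks).foldl (fun res p =>
      let idx := p.1
      let offsets := p.2
      let res := res ++ ["fill_color_step" ++ PySem.Int.toStr idx, "\tlda fill_color"]
      let sequences := pvA_find min_sequence_length max_sequence_length offsets
      let res := res ++ sequences.map (fun s =>
        "\t#fill_max_127 $" ++ pvHexBody (0xd800 + s.headD 0) ++ ", " ++ PySem.Int.toStr s.length)
      let flat_seq := sequences.flatMap (fun s => s)
      let remaining := offsets.filter (fun n => !(flat_seq.contains n))
      let res := res ++ remaining.map (fun o => "\tsta $" ++ pvHexBody (0xd800 + o))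
      res ++ ["\trts", ""]) []
  PySem.Str.join "\n" result

-- ===== PORT B =====
-- maximal runs of consecutive integers (itertools.groupby on value − index)
def pvRuns : List Int → List (List Int)
  | [] => []
  | x :: xs =>
    match pvRuns xs with
    | (y :: ys) :: rest => if y = x + 1 then (x :: y :: ys) :: rest else [x] :: (y :: ys) :: rest
    | rest => [x] :: rest

-- run[i:i+c] for i in range(0, len(run), c)   (c ≥ 1 at every call site)
def pvChunks (c : Nat) : List Int → List (List Int)
  | [] => []
  | x :: xs => (x :: xs.take (c - 1)) :: pvChunks c (xs.drop (c - 1))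
  termination_by l => l.length
  decreasing_by simp

def generate_color_fill_code_alt (fill_blocks : List (List Int)) (min_sequence_length : Int) (max_sequence_length : Int) : String :=
  let chunk := (max max_sequence_length 1).toNat
  let lines : List String :=
    (PySem.List.enumerate fill_blocks).foldl (fun lines p =>
      let idx := p.1
      let offsets := p.2
      let lines := lines ++ ["fill_color_step" ++ PySem.Int.toStr idx, "\tlda fill_color"]
      let pieces := ((pvRuns offsets).flatMap (pvChunks chunk)).filter
        (fun pc => min_sequence_length ≤ (pc.length : Int))
      let accepted : PySem.Set Int := pieces.foldl (fun s pc => PySem.Set.update s pc) PySem.Set.empty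
      let lines := lines ++ pieces.map (fun pc =>
        "\t#fill_max_127 $" ++ pvHexBody (0xd800 + pc.headD 0) ++ ", " ++ PySem.Int.toStr pc.length)
      let lines := lines ++ (offsets.filter (fun o => !(PySem.Set.contains accepted o))).map
        (fun o => "\tsta $" ++ pvHexBody (0xd800 + o))
      lines ++ ["\trts", ""]) []
  PySem.Str.join "\n" lines

-- ===== PRECONDITION & SPEC =====
def Spec_generate_color_fill_code (fill_blocks : List (List Int)) (min_sequence_length : Int) (max_sequence_length : Int) (out : String) : Prop := out = generate_color_fill_code_alt fill_blocks min_sequence_length max_sequence_length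
instance (fill_blocks : List (List Int)) (min_sequence_length : Int) (max_sequence_length : Int) (out : String) : Decidable (Spec_generate_color_fill_code fill_blocks min_sequence_length max_sequence_length out) := by unfold Spec_generate_color_fill_code; infer_instance

-- ===== CLAIM (what is proved, stated in full; the proofs are below) =====
def Claim_equal_generate_color_fill_code : Prop := ∀ (fill_blocks : List (List Int)) (min_sequence_length : Int) (max_sequence_length : Int), Dom_generate_color_fill_code fill_blocks min_sequence_length max_sequence_length → Spec_generate_color_fill_code fill_blocks min_sequence_length max_sequence_length (generate_color_fill_code fill_blocks min_sequence_length max_sequence_length)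

-- ===== LEMMAS AND PROOFS =====

-- A's loop, recursively: (chunks emitted, final current_seq)
def pvM (minL maxL : Int) (cur : List Int) : List Int → List (List Int) × List Int
  | [] => ([], cur)
  | n :: ns =>
    if cur = [] then pvM minL maxL [n] ns
    else if n = cur.getLastD 0 + 1 then
      if (cur.length : Int) < maxL then pvM minL maxL (cur ++ [n]) ns
      else
        let r := pvM minL maxL [n] ns
        ((if minL ≤ (cur.length : Int) then [cur] else []) ++ r.1, r.2)
    else
      let r := pvM minL maxL [n] ns
      ((if minL ≤ (cur.length : Int) then [cur] else []) ++ r.1, r.2)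

def pvEmit (minL maxL : Int) (cur ns : List Int) : List (List Int) :=
  let r := pvM minL maxL cur ns
  r.1 ++ (if r.2 ≠ [] ∧ minL ≤ (r.2.length : Int) then [r.2] else [])

theorem pvA_foldl (minL maxL : Int) :
    ∀ (ns : List Int) (seqs : List (List Int)) (cur : List Int),
      ns.foldl (pvA_step minL maxL) (seqs, cur)
        = (seqs ++ (pvM minL maxL cur ns).1, (pvM minL maxL cur ns).2) := by
  intro ns
  induction ns with
  | nil => intro seqs cur; simp [pvM]
  | cons n ns ih =>
    intro seqs cur
    by_cases h1 : cur = []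
    · simp [pvA_step, pvM, h1, ih]
    · by_cases h2 : n = cur.getLastD 0 + 1
      · by_cases h3 : (cur.length : Int) < maxL
        · simp [pvA_step, pvM, h1, h2, h3, ih]
        · simp only [List.foldl_cons, pvA_step, pvM, h1, h2, h3, if_false, if_true,
            ite_false, ite_true, if_neg, reduceIte]
          split_ifs <;> simp [ih, List.append_assoc] <;> simp_all
      · simp only [List.foldl_cons, pvA_step, pvM, h1, h2, if_false, ite_false, reduceIte]
        split_ifs <;> simp [ih, List.append_assoc] <;> simp_all

-- first maximal run
def pvRun1 (x : Int) : List Int → List Int × List Int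
  | [] => ([x], [])
  | y :: ys =>
    if y = x + 1 then
      let r := pvRun1 y ys
      (x :: r.1, r.2)
    else ([x], y :: ys)

def pvIsRun (l : List Int) : Prop := l.IsChain (fun a b => b = a + 1)

def pvBoundary (l rest : List Int) : Prop :=
  match rest with
  | [] => True
  | z :: _ => z ≠ l.getLastD 0 + 1

theorem pvRun1_spec (x : Int) (ys : List Int) :
    x :: ys = (pvRun1 x ys).1 ++ (pvRun1 x ys).2
    ∧ (∃ t, (pvRun1 x ys).1 = x :: t)
    ∧ pvIsRun (pvRun1 x ys).1
    ∧ pvBoundary (pvRun1 x ys).1 (pvRun1 x ys).2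
    ∧ (pvRun1 x ys).2.length ≤ ys.length := by
  induction ys generalizing x with
  | nil => simp [pvRun1, pvIsRun, pvBoundary]
  | cons y ys ih =>
    by_cases h : y = x + 1
    · subst h
      obtain ⟨he, ⟨t, ht⟩, hr, hb, hl⟩ := ih (x + 1)
      refine ⟨?_, ⟨(pvRun1 (x + 1) ys).1, by simp [pvRun1]⟩, ?_, ?_, ?_⟩
      · simpa [pvRun1] using he
      · simp only [pvRun1, reduceIte, pvIsRun] at hr ⊢
        rw [ht] at hr ⊢
        exact List.isChain_cons_cons.mpr ⟨rfl, hr⟩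
      · simp only [pvRun1, reduceIte, pvBoundary] at hb ⊢
        rw [ht] at hb ⊢
        cases hrest : (pvRun1 (x + 1) ys).2 with
        | nil => simp
        | cons z zs =>
          rw [hrest] at hb
          simpa [List.getLastD_cons] using hb
      · simp only [pvRun1, reduceIte, List.length_cons]
        exact Nat.le_succ_of_le hl
    · refine ⟨by simp [pvRun1, h], ⟨[], by simp [pvRun1, h]⟩, ?_, ?_, ?_⟩
      · simp [pvRun1, h, pvIsRun]
      · simp [pvRun1, h, pvBoundary]
      · simp [pvRun1, h]

theorem pvRuns_head (ns : List Int) (h : ns ≠ []) :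
    ∃ ys t, pvRuns ns = (ns.headD 0 :: ys) :: t := by
  cases ns with
  | nil => exact absurd rfl h
  | cons x xs =>
    simp only [List.headD_cons, pvRuns]
    cases hx : pvRuns xs with
    | nil => exact ⟨[], [], rfl⟩
    | cons r rest =>
      cases r with
      | nil => exact ⟨[], [] :: rest, rfl⟩
      | cons y ys =>
        by_cases hy : y = x + 1
        · exact ⟨y :: ys, rest, by simp [hy]⟩
        · exact ⟨[], (y :: ys) :: rest, by simp [hy]⟩

theorem pvRuns_append (r rest : List Int) (hr : r ≠ []) (hrun : pvIsRun r)
    (hb : pvBoundary r rest) : pvRuns (r ++ rest) = r :: pvRuns rest := by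
  induction r with
  | nil => exact absurd rfl hr
  | cons a r' ih =>
    cases r' with
    | nil =>
      cases rest with
      | nil => simp [pvRuns]
      | cons z rs =>
        simp only [pvBoundary, List.getLastD_cons, List.getLastD_nil] at hb
        obtain ⟨ys, t, hrt⟩ := pvRuns_head (z :: rs) (by simp)
        simp only [List.headD_cons] at hrt
        show pvRuns (a :: z :: rs) = [a] :: pvRuns (z :: rs)
        conv_lhs => rw [pvRuns]
        rw [hrt]
        simp [hb, hrt]
    | cons b r'' =>
      simp only [pvIsRun, List.isChain_cons_cons] at hrun
      obtain ⟨hab, hrun'⟩ := hrun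
      have hb' : pvBoundary (b :: r'') rest := by
        cases rest with
        | nil => trivial
        | cons z rs =>
          simp only [pvBoundary, List.getLastD_cons] at hb ⊢
          exact hb
      have := ih (by simp) hrun' hb'
      simp only [List.cons_append, pvRuns] at this ⊢
      rw [this]
      simp [hab]

theorem pvChunks_singleton (c : Nat) (l : List Int) (h0 : l ≠ []) (hc : l.length ≤ c) :
    pvChunks c l = [l] := by
  cases l with
  | nil => exact absurd rfl h0
  | cons x xs =>
    simp only [List.length_cons] at hc
    rw [pvChunks]
    rw [List.take_of_length_le (by omega), List.drop_of_length_le (by omega)]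
    rw [pvChunks]

theorem pvChunks_cons_full (c : Nat) (l m : List Int) (hc : l.length = c) (h1 : 1 ≤ c) :
    pvChunks c (l ++ m) = if m = [] then [l] else l :: pvChunks c m := by
  cases l with
  | nil => simp at hc; omega
  | cons x xs =>
    simp only [List.length_cons] at hc
    rw [List.cons_append, pvChunks]
    rw [List.take_append_of_le_length (by omega), List.drop_append_of_le_length (by omega)]
    rw [List.take_of_length_le (by omega), List.drop_of_length_le (by omega)]
    cases m with
    | nil => simp [pvChunks]
    | cons z zs => simp

theorem pvLenLt (maxL : Int) (cur : List Int) (h : cur ≠ []) :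
    ((cur.length : Int) < maxL) ↔ cur.length < (max maxL 1).toNat := by
  have h1 : 0 < cur.length := List.length_pos_of_ne_nil h
  rcases le_total maxL 1 with hm | hm
  · rw [max_eq_right hm]; omega
  · rw [max_eq_left hm]; omega

theorem pvC_pos (maxL : Int) : 1 ≤ (max maxL 1).toNat := by
  have : (1 : Int) ≤ max maxL 1 := le_max_right _ _
  omega

theorem pvGetLastD_append (l1 l2 : List Int) (h : l2 ≠ []) :
    (l1 ++ l2).getLastD 0 = l2.getLastD 0 := by
  rw [List.getLastD_eq_getLast?, List.getLastD_eq_getLast?,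
    List.getLast?_append_of_ne_nil l1 h]

theorem pvChainLast (cur : List Int) (n : Int) (ns : List Int) (h : cur ≠ [])
    (hc : pvIsRun (cur ++ n :: ns)) : n = cur.getLastD 0 + 1 := by
  have h2 := (List.isChain_append.1 hc).2.2
  cases hl : cur.getLast? with
  | none => exact absurd (List.getLast?_eq_none_iff.mp hl) h
  | some a =>
    have := h2 a (by rw [hl]; rfl) n rfl
    rw [List.getLastD_eq_getLast?, hl]
    exact this

-- the central lemma: A's machine over one maximal run emits exactly the min-filtered chunks
theorem pvM_run (minL maxL : Int) :
    ∀ (ns1 rest cur : List Int), cur ≠ [] → cur.length ≤ (max maxL 1).toNat →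
      pvIsRun (cur ++ ns1) → pvBoundary (cur ++ ns1) rest →
      pvEmit minL maxL cur (ns1 ++ rest)
        = (pvChunks (max maxL 1).toNat (cur ++ ns1)).filter
            (fun pc => minL ≤ (pc.length : Int))
          ++ pvEmit minL maxL [] rest := by
  intro ns1
  induction ns1 with
  | nil =>
    intro rest cur hne hlen hrun hb
    rw [List.append_nil] at hb
    rw [List.append_nil, pvChunks_singleton _ _ hne hlen]
    cases rest with
    | nil =>
      simp only [List.nil_append, pvEmit, pvM, hne]
      split_ifs with h1 h2 <;> simp_all
    | cons z rs =>
      simp only [pvBoundary] at hb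
      simp only [List.nil_append, pvEmit, pvM, hne, if_neg hb, reduceIte]
      split_ifs with h1 <;> simp_all [List.append_assoc]
  | cons n ns1 ih =>
    intro rest cur hne hlen hrun hb
    have hlast : n = cur.getLastD 0 + 1 := pvChainLast _ _ _ hne hrun
    have hc1 := pvC_pos maxL
    by_cases hlt : (cur.length : Int) < maxL
    · have hlt' : cur.length < (max maxL 1).toNat := (pvLenLt maxL cur hne).mp hlt
      have hrun' : pvIsRun ((cur ++ [n]) ++ ns1) := by
        rw [List.append_assoc]; simpa using hrun
      have hb' : pvBoundary ((cur ++ [n]) ++ ns1) rest := by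
        rw [List.append_assoc]; simpa using hb
      have key := ih rest (cur ++ [n]) (by simp) (by simp; omega) hrun' hb'
      have hstep : pvM minL maxL cur ((n :: ns1) ++ rest)
          = pvM minL maxL (cur ++ [n]) (ns1 ++ rest) := by
        rw [List.cons_append, pvM]
        simp [hne, hlast, hlt]
      simp only [pvEmit] at key ⊢
      rw [hstep, key, List.append_assoc, List.singleton_append]
    · have hEq : cur.length = (max maxL 1).toNat := by
        have := (pvLenLt maxL cur hne).not
        omega
      have hrun' : pvIsRun ([n] ++ ns1) := by
        have := (List.isChain_append.1 hrun).2.1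
        simpa using this
      have hb' : pvBoundary ([n] ++ ns1) rest := by
        cases rest with
        | nil => trivial
        | cons z rs =>
          simp only [pvBoundary] at hb ⊢
          rwa [pvGetLastD_append cur (n :: ns1) (by simp)] at hb
      have key := ih rest [n] (by simp) (by simpa using hc1) hrun' hb'
      have hstep : pvM minL maxL cur ((n :: ns1) ++ rest)
          = (((if minL ≤ (cur.length : Int) then [cur] else [])
              ++ (pvM minL maxL [n] (ns1 ++ rest)).1),
             (pvM minL maxL [n] (ns1 ++ rest)).2) := by
        rw [List.cons_append, pvM]
        simp [hne, hlast, hlt]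
      have hchunks : pvChunks (max maxL 1).toNat (cur ++ n :: ns1)
          = cur :: pvChunks (max maxL 1).toNat (n :: ns1) := by
        rw [pvChunks_cons_full _ _ _ hEq hc1]
        simp
      simp only [pvEmit] at key ⊢
      simp only [List.singleton_append] at key
      rw [hstep, hchunks]
      simp only [List.filter_cons]
      rw [List.append_assoc, key]
      by_cases h1 : minL ≤ (cur.length : Int) <;> simp [h1]

theorem pvEmit_eq_runs_aux (minL maxL : Int) :
    ∀ (N : Nat) (ns : List Int), ns.length ≤ N →
      pvEmit minL maxL [] ns
        = ((pvRuns ns).flatMap (pvChunks (max maxL 1).toNat)).filter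
            (fun pc => minL ≤ (pc.length : Int)) := by
  intro N
  induction N with
  | zero =>
    intro ns h
    have hnil : ns = [] := by
      cases ns with
      | nil => rfl
      | cons a b => simp at h
    subst hnil
    simp [pvEmit, pvM, pvRuns]
  | succ N ih =>
    intro ns h
    cases ns with
    | nil => simp [pvEmit, pvM, pvRuns]
    | cons x ys =>
      obtain ⟨he, ⟨t, ht⟩, hr, hb, hl⟩ := pvRun1_spec x ys
      have hrne : (pvRun1 x ys).1 ≠ [] := by rw [ht]; simp
      have hruns : pvRuns (x :: ys) = (pvRun1 x ys).1 :: pvRuns (pvRun1 x ys).2 := by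
        rw [he]; exact pvRuns_append _ _ hrne hr hb
      have hys : ys = t ++ (pvRun1 x ys).2 := by
        rw [ht] at he
        simpa using he
      have hchain : pvIsRun ([x] ++ t) := by
        rw [ht] at hr; simpa using hr
      have hbd : pvBoundary ([x] ++ t) (pvRun1 x ys).2 := by
        rw [ht] at hb; simpa using hb
      have main := pvM_run minL maxL t (pvRun1 x ys).2 [x] (by simp)
        (by simpa using pvC_pos maxL) hchain hbd
      have hM0 : pvEmit minL maxL [] (x :: ys)
          = pvEmit minL maxL [x] (t ++ (pvRun1 x ys).2) := by
        rw [← hys]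
        simp [pvEmit, pvM]
      rw [hM0, main, hruns]
      rw [List.flatMap_cons, List.filter_append]
      congr 1
      · rw [ht]; simp
      · exact ih _ (by
          rw [hys] at h
          simp only [List.length_cons, List.length_append] at h
          omega)

theorem pvEmit_eq_runs (minL maxL : Int) (ns : List Int) :
    pvEmit minL maxL [] ns
      = ((pvRuns ns).flatMap (pvChunks (max maxL 1).toNat)).filter
          (fun pc => minL ≤ (pc.length : Int)) :=
  pvEmit_eq_runs_aux minL maxL ns.length ns le_rfl

theorem pvFind_eq (minL maxL : Int) (ns : List Int) :
    pvA_find minL maxL ns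
      = ((pvRuns ns).flatMap (pvChunks (max maxL 1).toNat)).filter
          (fun pc => minL ≤ (pc.length : Int)) := by
  have h := pvA_foldl minL maxL ns [] []
  simp only [pvA_find, h, List.nil_append]
  have h2 := pvEmit_eq_runs minL maxL ns
  simp only [pvEmit] at h2
  rw [← h2]
  split_ifs <;> simp

theorem pvMem_foldl_update {pieces : List (List Int)} {s : PySem.Set Int} {o : Int} :
    o ∈ pieces.foldl (fun s pc => PySem.Set.update s pc) s ↔ o ∈ s ∨ ∃ pc ∈ pieces, o ∈ pc := by
  induction pieces generalizing s with
  | nil => simp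
  | cons pc pieces ih =>
    simp only [List.foldl_cons, ih, PySem.Set.mem_update, List.mem_cons]
    constructor
    · rintro (⟨h | h⟩ | ⟨q, hq, ho⟩)
      · exact Or.inl h
      · exact Or.inr ⟨pc, Or.inl rfl, h⟩
      · exact Or.inr ⟨q, Or.inr hq, ho⟩
    · rintro (h | ⟨q, (rfl | hq), ho⟩)
      · exact Or.inl (Or.inl h)
      · exact Or.inl (Or.inr ho)
      · exact Or.inr ⟨q, hq, ho⟩

theorem pvAccepted_contains (pieces : List (List Int)) (o : Int) :
    PySem.Set.contains (pieces.foldl (fun s pc => PySem.Set.update s pc) PySem.Set.empty) o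
      = (pieces.flatMap (fun s => s)).contains o := by
  rw [Bool.eq_iff_iff]
  rw [PySem.Set.contains_iff]
  simp only [List.contains_iff_mem, List.mem_flatMap]
  rw [pvMem_foldl_update]
  simp [PySem.Set.empty]

-- ===== VERDICT (by name: the statement is the Claim_ definition above) =====
theorem generate_color_fill_code_spec : Claim_equal_generate_color_fill_code := by
  intro fill_blocks minL maxL _hdom
  unfold Spec_generate_color_fill_code
  simp only [generate_color_fill_code, generate_color_fill_code_alt]
  congr 1
  apply PySem.List.foldl_congr_mem
  intro acc p _
  simp only [pvFind_eq, pvAccepted_contains]
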